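-- pv_equiv track=rewrite | github.com/DemetriusSemanko/AOC2025 | Day6/Day6.py | part2
-- ===== SOURCE A (Python) =====
-- import math
--
-- def part2(lines):
--     acc = 0
--     lines = list(zip(*lines[::-1]))
--
--     nums = []
--     op = ''
--     for line in lines:
--         mult = 1
--         num = 0
--         for c in line:
--             if (c.isdigit()):
--                 num += int(c) * mult
--                 mult *= 10
--             if (c == '*' or c == '+'):
--                 if (nums == []):
--                     op = c
--                 else:
--                     if (op == '*'):
--                         acc += math.prod(nums)
--                     else:
--                         acc += sum(nums)
--                     nums = []
--                     op = c
--         if (mult > 1):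
--             nums.append(num)
--     if (not nums == []):
--         if (op == '*'):
--             acc += math.prod(nums)
--         else:
--             acc += sum(nums)
--
--     return str(acc)
-- ===== SOURCE B (Python) =====
-- import math
--
-- def part2(lines):
--     # Token stream: per column (left to right) emit the column's operators
--     # (bottom to top) as (op, 0) pairs, then its number as ('', value).
--     width = min(map(len, lines), default=0)
--     tokens = []
--     for i in range(width):
--         col = [s[i] for s in lines]
--         tokens += [(c, 0) for c in reversed(col) if c in '*+']
--         digits = [c for c in col if c.isdigit()]
--         if digits:
--             n = 0
--             for d in digits:
--                 n = 10 * n + int(d)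
--             tokens.append(('', n))
--     # Evaluate the stream back to front: peel off the trailing group of
--     # numbers together with the operator just before it, repeat.
--     acc = 0
--     end = len(tokens)
--     while True:
--         k = end - 1
--         while k >= 0 and tokens[k][0] == '':
--             k -= 1
--         group = [v for _, v in tokens[k + 1:end]]
--         if k < 0:
--             return str(acc + sum(group))
--         if group:
--             acc += math.prod(group) if tokens[k][0] == '*' else sum(group)
--         end = k
-- ===== Notes on version B (the rewrite author's own statement) =====
-- stated objective: alternative
-- what changed: B replaces A's single forward pass (a state machine mutating acc/nums/op while scanning a zip-built transpose char by char) with a flat (op,value) token stream built per column by filter/Horner comprehensions, which is then consumed BACKWARDS: a while loop repeatedly scans back to the last operator and peels off the trailing group of numbers, so no bucket/current-op state is ever kept.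
import Mathlib
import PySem

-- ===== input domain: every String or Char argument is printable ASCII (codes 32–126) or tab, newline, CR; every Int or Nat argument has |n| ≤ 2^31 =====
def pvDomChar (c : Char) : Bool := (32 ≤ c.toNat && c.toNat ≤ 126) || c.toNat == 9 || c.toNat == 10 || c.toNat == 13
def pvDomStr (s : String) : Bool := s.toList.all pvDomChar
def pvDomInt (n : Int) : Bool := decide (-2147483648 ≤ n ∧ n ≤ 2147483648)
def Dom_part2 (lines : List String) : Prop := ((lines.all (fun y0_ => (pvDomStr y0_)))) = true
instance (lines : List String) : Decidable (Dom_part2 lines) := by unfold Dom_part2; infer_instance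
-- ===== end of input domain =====

-- B replaces A's forward accumulator state machine over a zip-built transpose by a flat token stream evaluated back to front, repeatedly peeling the trailing number group at the last operator; return values proved equal on all inputs.


-- min of a nonempty list of Nats, 0 for [] (the column count of zip(*rows); also Python's min(..., default=0))
def pyMinNat (l : List Nat) : Nat :=
  match l with
  | [] => 0
  | h :: t => t.foldl Nat.min h

-- ===== PORT A =====
-- zip(*rows): exactly (min length) tuples of heads; fuel = min length, so every headD hits a real element
def pyZipGo : Nat → List (List Char) → List (List Char)
  | 0, _ => []
  | n + 1, ls => ls.map (fun l => l.headD ' ') :: pyZipGo n (ls.map List.tail)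

def pyZip (ls : List (List Char)) : List (List Char) :=
  pyZipGo (pyMinNat (ls.map List.length)) ls

-- one char of A's inner loop; state ((mult, num), (acc, nums, op)); int(c) ported as c.toNat - 48 (exact for digit chars)
def part2CharStep (s : (Int × Int) × (Int × List Int × String)) (c : Char) :
    (Int × Int) × (Int × List Int × String) :=
  let mult := s.1.1; let num := s.1.2
  let acc := s.2.1; let nums := s.2.2.1; let op := s.2.2.2
  let num' := if PySem.Chars.isdigit c then num + ((c.toNat : Int) - 48) * mult else num
  let mult' := if PySem.Chars.isdigit c then mult * 10 else mult
  if c = '*' ∨ c = '+' then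
    if nums = [] then ((mult', num'), (acc, nums, String.ofList [c]))
    else ((mult', num'), (acc + (if op = "*" then nums.prod else nums.sum), ([] : List Int), String.ofList [c]))
  else ((mult', num'), (acc, nums, op))

-- one column of A's outer loop (the `for line in lines` body incl. the trailing `if mult > 1` append)
def part2ColStep (st : Int × List Int × String) (col : List Char) : Int × List Int × String :=
  let r := col.foldl part2CharStep ((1, 0), st)
  if r.1.1 > 1 then (r.2.1, r.2.2.1 ++ [r.1.2], r.2.2.2) else r.2

def part2 (lines : List String) : String :=
  let cols := pyZip ((lines.reverse).map String.toList)
  let fin := cols.foldl part2ColStep (0, [], "")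
  PySem.Int.toStr
    (if fin.2.1 = [] then fin.1
     else fin.1 + (if fin.2.2 = "*" then fin.2.1.prod else fin.2.1.sum))

-- ===== PORT B =====
-- B's tokens are pairs (op, value): ("*",0)/("+",0) for operators, ("", n) for a column number
-- first pass, body of `for i in range(width)`: append the column's op tokens (bottom to top), then its number token
def bColTokens (lines : List String) (i : Nat) (tks : List (String × Int)) : List (String × Int) :=
  let col := lines.map (fun s => s.toList.getD i ' ')   -- s[i]; always in range since i < width ≤ len s
  let tks := tks ++ (col.reverse.filter (fun c => c = '*' ∨ c = '+')).map (fun c => (String.ofList [c], (0 : Int)))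
  let digits := col.filter (fun c => PySem.Chars.isdigit c)
  if digits = [] then tks
  else tks ++ [("", digits.foldl (fun n d => 10 * n + ((d.toNat : Int) - 48)) 0)]

-- inner `while k >= 0 and tokens[k][0] == ''`: index of the last operator token strictly below e (none = k reached -1)
def bScanBack (ts : List (String × Int)) : Nat → Option Nat
  | 0 => none
  | k + 1 => if (ts.getD k ("", 0)).1 = "" then bScanBack ts k else some k

theorem bScanBack_lt (ts : List (String × Int)) : ∀ e k, bScanBack ts e = some k → k < e := by
  intro e
  induction e with
  | zero => intro k hk; simp [bScanBack] at hk
  | succ n ih =>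
      intro k hk
      unfold bScanBack at hk
      split at hk
      · exact Nat.lt_succ_of_lt (ih k hk)
      · cases hk; exact Nat.lt_succ_self n

-- outer `while True` loop: peel the trailing group tokens[k+1:e] with the operator at k, continue with e := k
def bEvLoop (ts : List (String × Int)) (acc : Int) (e : Nat) : Int :=
  match h : bScanBack ts e with
  | none => acc + (((ts.take e).map Prod.snd)).sum
  | some k =>
      let group := ((ts.drop (k + 1)).take (e - (k + 1))).map Prod.snd
      let acc' := if group = [] then acc
        else acc + (if (ts.getD k ("", 0)).1 = "*" then group.prod else group.sum)
      bEvLoop ts acc' k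
  termination_by e
  decreasing_by exact bScanBack_lt ts e k h

def part2_alt (lines : List String) : String :=
  let width := pyMinNat (lines.map (fun s => s.toList.length))
  let tokens := (List.range width).foldl (fun tks i => bColTokens lines i tks) []
  PySem.Int.toStr (bEvLoop tokens 0 tokens.length)

-- ===== PRECONDITION & SPEC =====
def Spec_part2 (lines : List String) (out : String) : Prop := out = part2_alt lines
instance (lines : List String) (out : String) : Decidable (Spec_part2 lines out) := by unfold Spec_part2; infer_instance

-- ===== CLAIM (what is proved, stated in full; the proofs are below) =====
def Claim_equal_part2 : Prop := ∀ (lines : List String), Dom_part2 lines → Spec_part2 lines (part2 lines)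

-- ===== LEMMAS AND PROOFS =====
-- column i of the transpose, chars bottom row first
def colOf (lines : List String) (i : Nat) : List Char :=
  lines.reverse.map (fun s => s.toList.getD i ' ')

-- abstract token machine: A's (acc, nums, op) state, one token at a time
def tokStep (st : Int × List Int × String) (t : String × Int) : Int × List Int × String :=
  if t.1 = "" then (st.1, st.2.1 ++ [t.2], st.2.2)
  else (st.1 + (if st.2.1 = [] then 0 else if st.2.2 = "*" then st.2.1.prod else st.2.1.sum), [], t.1)

def flushVal (b : List Int) (op : String) : Int :=
  if b = [] then 0 else if op = "*" then b.prod else b.sum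

def result (ts : List (String × Int)) : Int :=
  let f := ts.foldl tokStep (0, [], "")
  f.1 + flushVal f.2.1 f.2.2

-- little-endian value of the digits of a column (bottom row first)
def leVal (col : List Char) : Int :=
  (col.filter (fun c => PySem.Chars.isdigit c)).foldr (fun d acc => ((d.toNat : Int) - 48) + 10 * acc) 0

-- the tokens one column (bottom row first) contributes
def colToks (col : List Char) : List (String × Int) :=
  (col.filter (fun c => c = '*' ∨ c = '+')).map (fun c => (String.ofList [c], (0 : Int))) ++
    (if (col.filter (fun c => PySem.Chars.isdigit c)) = [] then [] else [("", leVal col)])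

-- the whole token stream, column by column
def tokensOf (lines : List String) : List (String × Int) :=
  (List.range (pyMinNat (lines.map (fun s => s.toList.length)))).flatMap (fun i => colToks (colOf lines i))

theorem isdigit_not_op (c : Char) (h : PySem.Chars.isdigit c = true) : ¬(c = '*' ∨ c = '+') := by
  rintro (rfl | rfl) <;> exact absurd h (by decide)

-- A's char loop over a column = closed form for (mult, num) × token-machine run over the column's op tokens
theorem charFold (col : List Char) :
    ∀ (m n : Int) (st : Int × List Int × String),
      col.foldl part2CharStep ((m, n), st) =
        ((m * 10 ^ (col.countP (fun c => PySem.Chars.isdigit c)), n + m * leVal col),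
          ((col.filter (fun c => c = '*' ∨ c = '+')).map
            (fun c => (String.ofList [c], (0 : Int)))).foldl tokStep st) := by
  induction col with
  | nil => intro m n st; simp [leVal]
  | cons c col ih =>
      intro m n st
      simp only [List.foldl_cons]
      cases hd : PySem.Chars.isdigit c with
      | true =>
          have hop := isdigit_not_op c hd
          have ha : part2CharStep ((m, n), st) c = ((m * 10, n + ((c.toNat : Int) - 48) * m), st) := by
            simp [part2CharStep, hd, hop]
          rw [ha, ih]
          have hv : leVal (c :: col) = ((c.toNat : Int) - 48) + 10 * leVal col := by
            simp [leVal, hd]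
          simp only [Prod.mk.injEq]
          refine ⟨⟨?_, ?_⟩, ?_⟩
          · simp [hd, pow_succ]; ring
          · rw [hv]; ring
          · simp [hop]
      | false =>
          by_cases hop : c = '*' ∨ c = '+'
          · have hstep : part2CharStep ((m, n), st) c = ((m, n), tokStep st (String.ofList [c], 0)) := by
              obtain ⟨acc, nums, op⟩ := st
              rcases hop with rfl | rfl <;> by_cases hn : nums = [] <;>
                simp [part2CharStep, tokStep, hd, hn]
            rw [hstep, ih]
            have hopb : (decide (c = '*' ∨ c = '+')) = true := by simp [hop]
            simp only [Prod.mk.injEq]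
            refine ⟨⟨?_, ?_⟩, ?_⟩
            · simp [hd]
            · simp [leVal, hd]
            · simp [hop]
          · have ha : part2CharStep ((m, n), st) c = ((m, n), st) := by
              simp [part2CharStep, hd, hop]
            rw [ha, ih]
            simp [hd, hop, leVal]

theorem pow_ten_gt_one_iff (k : Nat) : ((1 : Int) * 10 ^ k > 1) ↔ 0 < k := by
  constructor
  · intro h
    by_contra hk
    have : k = 0 := by omega
    subst this; simp at h
  · intro h
    have h2 : (10 : Int) ^ 1 ≤ 10 ^ k := pow_le_pow_right₀ (by norm_num) h
    simp at h2; omega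

theorem colStep_eq (col : List Char) (st : Int × List Int × String) :
    part2ColStep st col = (colToks col).foldl tokStep st := by
  unfold part2ColStep colToks
  rw [charFold, List.foldl_append]
  by_cases h : (col.filter (fun c => PySem.Chars.isdigit c)) = []
  · have hc : col.countP (fun c => PySem.Chars.isdigit c) = 0 := by
      rw [List.countP_eq_length_filter, h]; rfl
    simp [h, hc]
  · have hc : 0 < col.countP (fun c => PySem.Chars.isdigit c) := by
      rw [List.countP_eq_length_filter]
      exact List.length_pos_iff.mpr h
    have hgt : (1 : Int) * 10 ^ (col.countP (fun c => PySem.Chars.isdigit c)) > 1 :=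
      (pow_ten_gt_one_iff _).mpr hc
    rw [if_pos hgt]
    simp [h, tokStep]

-- ---- A equals the token machine over tokensOf ----
theorem getD_tail (l : List Char) (i : Nat) (d : Char) : l.tail.getD i d = l.getD (i + 1) d := by
  cases l <;> simp

theorem headD_eq_getD (l : List Char) (d : Char) : l.headD d = l.getD 0 d := by
  cases l <;> simp

theorem pyZipGo_eq (fuel : Nat) :
    ∀ ls : List (List Char),
      pyZipGo fuel ls = (List.range fuel).map (fun i => ls.map (fun l => l.getD i ' ')) := by
  induction fuel with
  | zero => intro ls; simp [pyZipGo]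
  | succ n ih =>
      intro ls
      rw [List.range_succ_eq_map]
      simp only [pyZipGo, List.map_cons, List.map_map, ih]
      congr 1
      · exact List.map_congr_left (fun l _ => headD_eq_getD l ' ')
      · apply List.map_congr_left
        intro i _
        simp only [Function.comp]
        exact List.map_congr_left (fun l _ => getD_tail l i ' ')

theorem min_comm' (a b : Nat) : a.min b = b.min a := by
  simp only [Nat.min_def]; split_ifs <;> omega

theorem min_swap (a b c : Nat) : (a.min b).min c = (a.min c).min b := by
  simp only [Nat.min_def]; split_ifs <;> omega

theorem foldl_min_min (l : List Nat) : ∀ a b, l.foldl Nat.min (Nat.min a b) = Nat.min b (l.foldl Nat.min a) := by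
  induction l with
  | nil => intro a b; simp [Nat.min_comm]
  | cons c l ih =>
      intro a b
      simp only [List.foldl_cons]
      rw [min_swap, ih]

theorem foldl_min_reverse (l : List Nat) : ∀ a, l.reverse.foldl Nat.min a = l.foldl Nat.min a := by
  induction l with
  | nil => intro a; simp
  | cons x l ih =>
      intro a
      simp only [List.reverse_cons, List.foldl_append, List.foldl_cons, List.foldl_nil, ih]
      rw [foldl_min_min l a x]
      exact min_comm' _ _

theorem pyMinNat_append_singleton (l : List Nat) (h : Nat) :
    pyMinNat (l ++ [h]) = l.foldl Nat.min h := by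
  cases l with
  | nil => simp [pyMinNat]
  | cons a l =>
      simp only [pyMinNat, List.cons_append, List.foldl_append, List.foldl_cons, List.foldl_nil]
      rw [min_comm' h a, foldl_min_min l a h]
      exact min_comm' _ _

theorem pyMinNat_reverse (l : List Nat) : pyMinNat l.reverse = pyMinNat l := by
  cases l with
  | nil => rfl
  | cons h t =>
      simp only [List.reverse_cons]
      rw [pyMinNat_append_singleton, foldl_min_reverse]
      rfl

theorem ifFlush_eq (a : Int) (b : List Int) (op : String) :
    (if b = [] then a else a + (if op = "*" then b.prod else b.sum)) = a + flushVal b op := by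
  unfold flushVal
  by_cases h : b = [] <;> simp [h]

theorem part2_eq_result (lines : List String) :
    part2 lines = PySem.Int.toStr (result (tokensOf lines)) := by
  unfold part2 tokensOf result
  have hlen : ((lines.reverse.map String.toList).map List.length)
      = (lines.map (fun s => s.toList.length)).reverse := by
    simp [List.map_reverse, List.map_map, Function.comp]
  have hzip : pyZip ((lines.reverse).map String.toList)
      = (List.range (pyMinNat (lines.map (fun s => s.toList.length)))).map (colOf lines) := by
    rw [pyZip, hlen, pyMinNat_reverse, pyZipGo_eq]
    apply List.map_congr_left
    intro i _
    rw [colOf, List.map_map]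
    rfl
  rw [hzip]
  simp only [List.foldl_map, colStep_eq, List.foldl_flatMap]
  congr 1
  exact ifFlush_eq _ _ _

-- ---- B's first pass builds tokensOf ----
theorem bColTokens_eq (lines : List String) (i : Nat) (tks : List (String × Int)) :
    bColTokens lines i tks = tks ++ colToks (colOf lines i) := by
  have hrev : (lines.map (fun s => s.toList.getD i ' ')).reverse = colOf lines i := by
    rw [colOf, List.map_reverse]
  have hfilterd : (lines.map (fun s => s.toList.getD i ' ')).filter (fun c => PySem.Chars.isdigit c)
      = ((colOf lines i).filter (fun c => PySem.Chars.isdigit c)).reverse := by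
    rw [← hrev, List.filter_reverse, List.reverse_reverse]
  have hval : ∀ ds : List Char,
      (ds.reverse.foldl (fun n d => 10 * n + ((d.toNat : Int) - 48)) 0)
        = ds.foldr (fun d acc => ((d.toNat : Int) - 48) + 10 * acc) 0 := by
    intro ds
    rw [List.foldl_reverse]
    induction ds with
    | nil => rfl
    | cons d ds ih => simp only [List.foldr_cons, ih]; ring
  unfold bColTokens colToks leVal
  simp only [hrev, hfilterd, hval, List.reverse_eq_nil_iff]
  by_cases h : ((colOf lines i).filter (fun c => PySem.Chars.isdigit c)) = []
  · simp [h]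
  · simp [h, List.append_assoc]

theorem bTokens_eq (lines : List String) :
    (List.range (pyMinNat (lines.map (fun s => s.toList.length)))).foldl
        (fun tks i => bColTokens lines i tks) [] = tokensOf lines := by
  unfold tokensOf
  have hfun : (fun (tks : List (String × Int)) (i : Nat) => bColTokens lines i tks)
      = fun tks i => tks ++ colToks (colOf lines i) := by
    funext tks i
    exact bColTokens_eq lines i tks
  rw [hfun, PySem.List.foldl_append_eq_flatMap]
  simp

-- ---- B's second pass computes `result` ----
theorem bScanBack_none (ts : List (String × Int)) :
    ∀ e, bScanBack ts e = none → ∀ j, j < e → (ts.getD j ("", 0)).1 = "" := by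
  intro e
  induction e with
  | zero => intro _ j hj; omega
  | succ n ih =>
      intro h j hj
      unfold bScanBack at h
      split at h
      · rcases Nat.lt_succ_iff_lt_or_eq.mp hj with hlt | rfl
        · exact ih h j hlt
        · assumption
      · cases h

theorem bScanBack_some (ts : List (String × Int)) :
    ∀ e k, bScanBack ts e = some k →
      (ts.getD k ("", 0)).1 ≠ "" ∧ ∀ j, k < j → j < e → (ts.getD j ("", 0)).1 = "" := by
  intro e
  induction e with
  | zero => intro k h; simp [bScanBack] at h
  | succ n ih =>
      intro k h
      unfold bScanBack at h
      split at h
      next hn =>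
        obtain ⟨h1, h2⟩ := ih k h
        refine ⟨h1, fun j hkj hj => ?_⟩
        rcases Nat.lt_succ_iff_lt_or_eq.mp hj with hlt | rfl
        · exact h2 j hkj hlt
        · exact hn
      next hn =>
        cases h
        exact ⟨hn, fun j hkj hj => by omega⟩

theorem foldl_allnum (ns : List (String × Int)) :
    ∀ st, (∀ t ∈ ns, t.1 = "") →
      ns.foldl tokStep st = (st.1, st.2.1 ++ ns.map Prod.snd, st.2.2) := by
  induction ns with
  | nil => intro st _; simp
  | cons t ns ih =>
      intro st h
      have ht : t.1 = "" := h t (by simp)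
      simp only [List.foldl_cons, tokStep, ht, if_true]
      rw [ih _ (fun x hx => h x (by simp [hx]))]
      simp

theorem result_allnum (ns : List (String × Int)) (h : ∀ t ∈ ns, t.1 = "") :
    result ns = (ns.map Prod.snd).sum := by
  unfold result
  rw [foldl_allnum ns _ h]
  by_cases hn : ns.map Prod.snd = [] <;> simp [flushVal, hn]

theorem result_append_op (pre : List (String × Int)) (t : String × Int) (ns : List (String × Int))
    (ht : t.1 ≠ "") (hns : ∀ x ∈ ns, x.1 = "") :
    result (pre ++ t :: ns) = result pre + flushVal (ns.map Prod.snd) t.1 := by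
  unfold result
  rw [List.foldl_append, List.foldl_cons]
  set f := pre.foldl tokStep (0, [], "") with hf
  have hstep : tokStep f t = (f.1 + flushVal f.2.1 f.2.2, [], t.1) := by
    unfold tokStep flushVal
    simp [ht]
  rw [hstep, foldl_allnum _ _ hns]
  simp only [List.nil_append]

theorem bEvLoop_eq (ts : List (String × Int)) :
    ∀ e acc, bEvLoop ts acc e = acc + result (ts.take e) := by
  intro e
  induction e using Nat.strong_induction_on with
  | _ e ih =>
    intro acc
    rw [bEvLoop]
    split
    next h =>
      have hall : ∀ t ∈ ts.take e, t.1 = "" := by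
        intro t htm
        obtain ⟨j, hj, rfl⟩ := List.getElem_of_mem htm
        have hje : j < e := by
          have := List.length_take_le e ts
          have hj' := hj
          simp only [List.length_take] at hj'
          omega
        have hjl : j < ts.length := by
          simp only [List.length_take] at hj
          omega
        have h2 := bScanBack_none ts e h j hje
        rw [List.getD_eq_getElem ts ("", 0) hjl] at h2
        simpa [List.getElem_take] using h2
      rw [result_allnum _ hall]
    next k h =>
      obtain ⟨hop, hmid⟩ := bScanBack_some ts e k h
      have hke : k < e := bScanBack_lt ts e k h
      have hkl : k < ts.length := by
        by_contra hge
        exact hop (by rw [List.getD_eq_default ts ("", 0) (by omega)])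
      have htake : ts.take e = ts.take k ++ (ts.getD k ("", 0)) :: (ts.drop (k + 1)).take (e - (k + 1)) := by
        have h1 : ts.take e = ts.take (k + 1) ++ (ts.drop (k + 1)).take (e - (k + 1)) := by
          rw [← List.take_add]
          congr 1
          omega
        have h2 : ts.take (k + 1) = ts.take k ++ [ts.getD k ("", 0)] := by
          rw [List.take_add_one]
          simp [List.getElem?_eq_getElem hkl, List.getD_eq_getElem?_getD]
        rw [h1, h2, List.append_assoc]
        rfl
      have hmidall : ∀ x ∈ (ts.drop (k + 1)).take (e - (k + 1)), x.1 = "" := by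
        intro x hx
        obtain ⟨j, hj, rfl⟩ := List.getElem_of_mem hx
        have hjd : j < (ts.drop (k + 1)).length := by
          simp only [List.length_take] at hj
          omega
        have hjl : k + 1 + j < ts.length := by
          simp only [List.length_drop] at hjd
          omega
        have hje : k + 1 + j < e := by
          simp only [List.length_take] at hj
          omega
        have h2 := hmid (k + 1 + j) (by omega) hje
        rw [List.getD_eq_getElem ts ("", 0) hjl] at h2
        simpa [List.getElem_take, List.getElem_drop] using h2
      rw [htake, result_append_op _ _ _ hop hmidall]
      rw [ih k hke]
      unfold flushVal
      by_cases hg : ((ts.drop (k + 1)).take (e - (k + 1))).map Prod.snd = []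
      · simp only [hg, if_true]
        ring_nf
      · rw [if_neg hg, if_neg hg]
        by_cases hstar : (ts.getD k ("", 0)).1 = "*"
        · rw [if_pos hstar]; ring
        · rw [if_neg hstar]; ring

-- ===== VERDICT (by name: the statement is the Claim_ definition above) =====
theorem part2_spec : Claim_equal_part2 := by
  intro lines _
  unfold Spec_part2
  rw [part2_eq_result]
  unfold part2_alt
  simp only [bTokens_eq, bEvLoop_eq, List.take_length, zero_add]
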